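-- pv_equiv track=rewrite | github.com/nmintzer-oswego/Noahs-Portfolio | LinguisticLibray/code/wordnet/morpheme_rules.py | has_triple_vowels
-- ===== SOURCE A (Python) =====
-- VOWELS = {'a', 'e', 'i', 'o', 'u'}
--
-- def has_triple_vowels(word: str) -> bool:
--     """Check if word has three consecutive vowels."""
--     vowel_count = 0
--     for char in word.lower():
--         if char in VOWELS:
--             vowel_count += 1
--             if vowel_count >= 3:
--                 return True
--         else:
--             vowel_count = 0
--     return False
-- ===== SOURCE B (Python) =====
-- VOWELS = {'a', 'e', 'i', 'o', 'u'}
--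
-- def has_triple_vowels(word: str) -> bool:
--     """Check if word has three consecutive vowels."""
--     mask = ''.join('V' if c in VOWELS else '.' for c in word.lower())
--     return 'VVV' in mask
-- ===== Notes on version B (the rewrite author's own statement) =====
-- stated objective: idiomatic
-- what changed: Replaces the counter-with-reset loop and early return by building a vowel/non-vowel mask string over the lowercased word and using Python's substring search to find a run of three vowel markers.
import Mathlib
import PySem

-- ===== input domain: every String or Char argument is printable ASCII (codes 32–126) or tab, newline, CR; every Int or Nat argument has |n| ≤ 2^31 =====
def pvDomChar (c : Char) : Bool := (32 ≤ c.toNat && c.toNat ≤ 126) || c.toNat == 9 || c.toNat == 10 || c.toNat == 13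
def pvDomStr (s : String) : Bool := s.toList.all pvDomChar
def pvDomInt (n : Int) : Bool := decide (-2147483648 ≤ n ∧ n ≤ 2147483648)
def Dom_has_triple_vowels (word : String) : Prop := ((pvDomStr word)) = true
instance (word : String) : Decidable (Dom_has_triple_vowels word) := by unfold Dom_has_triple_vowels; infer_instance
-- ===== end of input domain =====

-- B builds a vowel mask over word.lower() and uses substring search for 'VVV' instead of A's
-- counter-with-reset loop; objective: idiomatic, same O(n) cost.

-- ===== PORT A =====
-- VOWELS = {'a','e','i','o','u'}
def pyVOWELS : PySem.Set Char := PySem.Set.ofList ['a', 'e', 'i', 'o', 'u']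

-- the for-loop with the running counter and early return
def hasTripleLoop : List Char → Nat → Bool
  | [], _ => false
  | c :: rest, vowel_count =>
    if pyVOWELS.contains c then
      if vowel_count + 1 ≥ 3 then true else hasTripleLoop rest (vowel_count + 1)
    else hasTripleLoop rest 0

def has_triple_vowels (word : String) : Bool :=
  hasTripleLoop (PySem.Str.lower word).toList 0

-- ===== PORT B =====
def has_triple_vowels_alt (word : String) : Bool :=
  let mask : String :=
    String.ofList ((PySem.Str.lower word).toList.map
      (fun c => if pyVOWELS.contains c then 'V' else '.'))
  PySem.Str.isIn "VVV" mask

-- ===== PRECONDITION & SPEC =====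
def Spec_has_triple_vowels (word : String) (out : Bool) : Prop := out = has_triple_vowels_alt word
instance (word : String) (out : Bool) : Decidable (Spec_has_triple_vowels word out) := by unfold Spec_has_triple_vowels; infer_instance

-- ===== CLAIM (what is proved, stated in full; the proofs are below) =====
def Claim_equal_has_triple_vowels : Prop := ∀ (word : String), Dom_has_triple_vowels word → Spec_has_triple_vowels word (has_triple_vowels word)

-- ===== LEMMAS AND PROOFS =====

def maskOf (cs : List Char) : List Char :=
  cs.map (fun c => if pyVOWELS.contains c then 'V' else '.')

-- loop invariant: with k vowels already pending (k ≤ 2), the loop reports true iff the mask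
-- of the rest contains 'VVV' or starts with the missing 3-k 'V's
theorem replicate_prefix_replicate {a : Char} {m n : Nat} (h : m ≤ n) :
    List.replicate m a <+: List.replicate n a :=
  ⟨List.replicate (n - m) a, by rw [← List.replicate_add]; congr 1; omega⟩

-- loop invariant: with k vowels already pending (k ≤ 2), the loop reports true iff the mask
-- of the rest contains 'VVV' or starts with the missing 3-k 'V's
theorem hasTripleLoop_iff (cs : List Char) (k : Nat) (hk : k ≤ 2) :
    hasTripleLoop cs k = true ↔
      (['V','V','V'] <:+: maskOf cs ∨ List.replicate (3 - k) 'V' <+: maskOf cs) := by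
  induction cs generalizing k with
  | nil =>
    simp [hasTripleLoop, maskOf, List.replicate_eq_nil_iff]
    omega
  | cons c rest ih =>
    by_cases hm : c ∈ pyVOWELS
    · have hv : pyVOWELS.contains c = true := (PySem.Set.contains_iff _ _).mpr hm
      have hmask : maskOf (c :: rest) = 'V' :: maskOf rest := by simp [maskOf, hm]
      by_cases h3 : k + 1 ≥ 3
      · have hk2 : k = 2 := by omega
        subst hk2
        rw [show hasTripleLoop (c :: rest) 2 = true by simp [hasTripleLoop, hm], hmask]
        constructor
        · intro _
          exact Or.inr ⟨maskOf rest, rfl⟩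
        · intro _; rfl
      · have hk1 : k ≤ 1 := by omega
        rw [show hasTripleLoop (c :: rest) k = hasTripleLoop rest (k + 1) by
          simp [hasTripleLoop, hm]
          omega]
        rw [ih (k + 1) (by omega), hmask]
        have hrep : (3 - k) = (3 - (k + 1)) + 1 := by omega
        rw [hrep, List.replicate_succ, List.cons_prefix_cons]
        rw [List.infix_cons_iff]
        constructor
        · rintro (h | h)
          · exact Or.inl (Or.inr h)
          · exact Or.inr ⟨rfl, h⟩
        · rintro ((h | h) | ⟨-, h⟩)
          · rw [show (['V','V','V'] : List Char) = 'V' :: ['V','V'] from rfl,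
              List.cons_prefix_cons] at h
            refine Or.inr (List.IsPrefix.trans ?_ h.2)
            rw [show (['V','V'] : List Char) = List.replicate 2 'V' from rfl]
            exact replicate_prefix_replicate (by omega)
          · exact Or.inl h
          · exact Or.inr h
    · have hv : pyVOWELS.contains c = false := by
        simpa using fun h => hm ((PySem.Set.contains_iff _ _).mp h)
      have hmask : maskOf (c :: rest) = '.' :: maskOf rest := by simp [maskOf, hm]
      rw [show hasTripleLoop (c :: rest) k = hasTripleLoop rest 0 by
        simp [hasTripleLoop, hm]]
      rw [ih 0 (by omega), hmask, List.infix_cons_iff]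
      constructor
      · rintro (h | h)
        · exact Or.inl (Or.inr h)
        · exact Or.inl (Or.inr h.isInfix)
      · rintro ((h | h) | h)
        · rw [show (['V','V','V'] : List Char) = 'V' :: ['V','V'] from rfl,
            List.cons_prefix_cons] at h
          exact absurd h.1 (by decide)
        · exact Or.inl h
        · exfalso
          have h1 : 3 - k = (3 - k - 1) + 1 := by omega
          rw [h1, List.replicate_succ, List.cons_prefix_cons] at h
          exact absurd h.1 (by decide)

theorem has_triple_vowels_spec : Claim_equal_has_triple_vowels := by
  intro word _
  show has_triple_vowels word = has_triple_vowels_alt word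
  have hiff : has_triple_vowels word = true ↔ has_triple_vowels_alt word = true := by
    unfold has_triple_vowels has_triple_vowels_alt
    rw [hasTripleLoop_iff _ 0 (by omega), PySem.Str.isIn_iff_infix]
    simp only [String.toList_ofList]
    rw [show List.replicate (3 - 0) 'V' = (['V','V','V'] : List Char) from rfl]
    constructor
    · rintro (h | h)
      · exact h
      · exact h.isInfix
    · exact fun h => Or.inl h
  cases hA : has_triple_vowels word <;> cases hB : has_triple_vowels_alt word <;> simp_all
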